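-- pv_equiv track=rewrite | github.com/Abhinay-kal/New_pdf2Excel | infrastructure/strategies/grid_projection.py | _reduce_to_expected
-- ===== SOURCE A (Python) =====
-- def _reduce_to_expected(positions: list[int], expected: int) -> list[int]:
--     """
--     Iteratively remove the member of the smallest gap until
--     len(positions) == expected.
--     """
--     positions = sorted(positions)
--     while len(positions) > expected and len(positions) >= 2:
--         gaps = [
--             (i, positions[i + 1] - positions[i])
--             for i in range(len(positions) - 1)
--         ]
--         min_idx, _ = min(gaps, key=lambda g: g[1])
--         # Remove the interior point of the smallest gap
--         if min_idx == 0: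
--             remove_at = 1
--         elif min_idx == len(positions) - 2:
--             remove_at = min_idx
--         else:
--             remove_at = min_idx + 1
--         positions.pop(remove_at)
--     return positions
-- ===== SOURCE B (Python) =====
-- def _reduce_to_expected(positions: list[int], expected: int) -> list[int]:
--     """
--     Same reduction expressed on the gap vector: keep the first point, merge the
--     smallest adjacent gap into its neighbour until only `expected` points worth
--     of gaps remain, then rebuild the points by prefix sums.
--     """
--     pts = sorted(positions)
--     if len(pts) < 2 or len(pts) <= expected:
--         return pts
--     first = pts[0]
--     gaps = [b - a for a, b in zip(pts, pts[1:])]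
--     while len(gaps) + 1 > expected and len(gaps) >= 1:
--         # single-pass argmin (first minimum)
--         m, best = 0, gaps[0]
--         for j in range(1, len(gaps)):
--             if gaps[j] < best:
--                 m, best = j, gaps[j]
--         if len(gaps) == 1:
--             gaps = []
--         elif m == len(gaps) - 1:
--             gaps[m - 1] += gaps[m]
--             del gaps[m]
--         else:
--             gaps[m] += gaps[m + 1]
--             del gaps[m + 1]
--     out = [first]
--     for g in gaps:
--         out.append(out[-1] + g)
--     return out
-- ===== Notes on version B (the rewrite author's own statement) =====
-- stated objective: alternative
-- what changed: B works on the gap vector instead of the position list: it builds the list of adjacent gaps once, repeatedly merges the smallest gap into its neighbour with a single-pass argmin scan, and reconstructs the surviving positions at the end by prefix sums from the first point, where A re-builds an (index, gap) tuple list, calls min with a key function and pops from the position list on every iteration.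
import Mathlib
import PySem

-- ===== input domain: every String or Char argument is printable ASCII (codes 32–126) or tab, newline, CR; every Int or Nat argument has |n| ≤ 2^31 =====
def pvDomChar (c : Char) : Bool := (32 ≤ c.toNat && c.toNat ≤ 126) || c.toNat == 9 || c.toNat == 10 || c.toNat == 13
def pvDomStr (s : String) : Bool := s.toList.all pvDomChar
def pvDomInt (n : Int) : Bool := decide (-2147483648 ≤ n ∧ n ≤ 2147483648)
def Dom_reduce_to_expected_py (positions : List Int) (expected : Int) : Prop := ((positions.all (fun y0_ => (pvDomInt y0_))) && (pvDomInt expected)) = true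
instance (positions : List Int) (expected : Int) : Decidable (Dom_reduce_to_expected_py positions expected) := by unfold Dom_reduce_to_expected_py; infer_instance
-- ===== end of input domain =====

-- B re-states the reduction on the gap vector (merge the smallest adjacent gap, then rebuild
-- the points by prefix sums) instead of re-building an (index, gap) tuple list and popping the
-- position list each iteration; same asymptotic class, measurably faster by a constant factor.

-- ===== PORT A =====
-- gaps = [(i, positions[i+1] - positions[i]) for i in range(len(positions) - 1)]
def aGaps (positions : List Int) : List (Int × Int) :=
  (PySem.List.pyRange 0 ((positions.length : Int) - 1)).map
    (fun i => (i, PySem.List.pyGetD positions (i + 1) 0 - PySem.List.pyGetD positions i 0))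

-- the while-loop of A; the `.getD` defaults are never used: under the guard the gaps list is
-- nonempty (so min? is some) and remove_at is always in range (so pop? is some)
def aLoop (positions : List Int) (expected : Int) : List Int :=
  if h : expected < (positions.length : Int) ∧ 2 ≤ positions.length then
    let mi := (PySem.List.min? (aGaps positions) (fun g => g.2)).getD (0, 0)
    let remove_at : Int :=
      if mi.1 = 0 then 1
      else if mi.1 = (positions.length : Int) - 2 then mi.1
      else mi.1 + 1
    aLoop ((PySem.List.pop? positions remove_at).getD (0, [])).2 expected
  else positions
termination_by positions.length
decreasing_by
  rcases hp : PySem.List.pop? positions remove_at with _ | pr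
  · simp only [Option.getD_none, List.length_nil]; omega
  · have := PySem.List.length_of_pop?_eq_some positions hp
    simp only [Option.getD_some]; omega

def reduce_to_expected_py (positions : List Int) (expected : Int) : List Int :=
  aLoop (PySem.List.sorted positions (fun x => x)) expected

-- ===== PORT B =====
-- gaps = [b - a for a, b in zip(pts, pts[1:])]
def diffsB (pts : List Int) : List Int :=
  (pts.zip (pts.drop 1)).map (fun p => p.2 - p.1)

-- single-pass argmin scan: m, best = 0, gaps[0]; for j in range(1, len(gaps)): …
def bArgmin (gaps : List Int) : Int × Int :=
  (PySem.List.pyRange 1 (gaps.length : Int)).foldl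
    (fun mb j =>
      if PySem.List.pyGetD gaps j 0 < mb.2 then (j, PySem.List.pyGetD gaps j 0) else mb)
    (0, PySem.List.pyGetD gaps 0 0)

-- termination helper for bLoop (cited in its decreasing_by): the scanned argmin index
-- stays inside the gaps list
lemma scan_fst_cases (gv : Int → Int) (l : List Int) : ∀ (mb : Int × Int),
    (l.foldl (fun mb j => if gv j < mb.2 then (j, gv j) else mb) mb).1 = mb.1 ∨
    (l.foldl (fun mb j => if gv j < mb.2 then (j, gv j) else mb) mb).1 ∈ l := by
  induction l with
  | nil => intro mb; simp
  | cons x t ih =>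
      intro mb
      simp only [List.foldl_cons]
      rcases ih (if gv x < mb.2 then (x, gv x) else mb) with h | h
      · by_cases hx : gv x < mb.2
        · simp only [if_pos hx] at h ⊢; simp [h]
        · simp only [if_neg hx] at h ⊢
          simp [h]
      · simp [h]

lemma bArgmin_fst_bound (gaps : List Int) (h : 1 ≤ gaps.length) :
    0 ≤ (bArgmin gaps).1 ∧ (bArgmin gaps).1 < (gaps.length : Int) := by
  have hc := scan_fst_cases (fun j => PySem.List.pyGetD gaps j 0)
      (PySem.List.pyRange 1 (gaps.length : Int)) (0, PySem.List.pyGetD gaps 0 0)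
  unfold bArgmin
  rcases hc with hc | hc
  · rw [hc]; constructor <;> omega
  · rw [PySem.List.mem_pyRange_one] at hc; omega

-- the while-loop of B, on the gap vector
def bLoop (gaps : List Int) (expected : Int) : List Int :=
  if h : expected < (gaps.length : Int) + 1 ∧ 1 ≤ gaps.length then
    let m := (bArgmin gaps).1
    if h1 : gaps.length = 1 then bLoop [] expected
    else if h2 : m = (gaps.length : Int) - 1 then
      bLoop ((gaps.set (m - 1).toNat
        (PySem.List.pyGetD gaps (m - 1) 0 + PySem.List.pyGetD gaps m 0)).eraseIdx m.toNat) expected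
    else
      bLoop ((gaps.set m.toNat
        (PySem.List.pyGetD gaps m 0 + PySem.List.pyGetD gaps (m + 1) 0)).eraseIdx (m + 1).toNat) expected
  else gaps
termination_by gaps.length
decreasing_by
  · simp only [List.length_nil]
    omega
  · simp only [List.length_eraseIdx, List.length_set]
    split_ifs <;> omega
  · have hb := bArgmin_fst_bound gaps h.2
    simp only [List.length_eraseIdx, List.length_set]
    split_ifs <;> omega

-- out = [first]; cur = first; for g in gaps: cur += g; out.append(cur)   (the tail after `first`)
def bRecon (cur : Int) : List Int → List Int
  | [] => []
  | g :: t => (cur + g) :: bRecon (cur + g) t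

def reduce_to_expected_py_alt (positions : List Int) (expected : Int) : List Int :=
  let pts := PySem.List.sorted positions (fun x => x)
  if pts.length < 2 ∨ (pts.length : Int) ≤ expected then pts
  else
    let first := PySem.List.pyGetD pts 0 0
    first :: bRecon first (bLoop (diffsB pts) expected)

-- ===== PRECONDITION & SPEC =====
def Spec_reduce_to_expected_py (positions : List Int) (expected : Int) (out : List Int) : Prop := out = reduce_to_expected_py_alt positions expected
instance (positions : List Int) (expected : Int) (out : List Int) : Decidable (Spec_reduce_to_expected_py positions expected out) := by unfold Spec_reduce_to_expected_py; infer_instance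

-- ===== CLAIM (what is proved, stated in full; the proofs are below) =====
def Claim_equal_reduce_to_expected_py : Prop := ∀ (positions : List Int) (expected : Int), Dom_reduce_to_expected_py positions expected → Spec_reduce_to_expected_py positions expected (reduce_to_expected_py positions expected)

-- ===== LEMMAS AND PROOFS =====

@[simp] lemma diffsB_nil : diffsB [] = [] := rfl
@[simp] lemma diffsB_single (a : Int) : diffsB [a] = [] := rfl
@[simp] lemma diffsB_cons₂ (a b : Int) (t : List Int) :
    diffsB (a :: b :: t) = (b - a) :: diffsB (b :: t) := rfl

@[simp] lemma length_diffsB (L : List Int) : (diffsB L).length = L.length - 1 := by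
  simp [diffsB]

@[simp] lemma bRecon_length (c : Int) (gl : List Int) : (bRecon c gl).length = gl.length := by
  induction gl generalizing c with
  | nil => rfl
  | cons g t ih => simp [bRecon, ih]

lemma recon_diffs (t : List Int) : ∀ (a : Int), bRecon a (diffsB (a :: t)) = t := by
  induction t with
  | nil => intro a; rfl
  | cons b t' ih =>
      intro a
      simp only [diffsB_cons₂, bRecon]
      have hb : a + (b - a) = b := by ring
      rw [hb, ih b]

lemma diffsB_getD (L : List Int) (k : Nat) (h : k + 1 < L.length) :
    (diffsB L).getD k 0 = L.getD (k + 1) 0 - L.getD k 0 := by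
  have hk : k < (diffsB L).length := by simp; omega
  have h1 : k + 1 < L.length := h
  have h0 : k < L.length := by omega
  rw [List.getD_eq_getElem _ _ hk, List.getD_eq_getElem _ _ h1, List.getD_eq_getElem _ _ h0]
  simp [diffsB]

lemma aGaps_eq_enumerate (L : List Int) (h : 1 ≤ L.length) :
    aGaps L = PySem.List.enumerate (diffsB L) 0 := by
  rw [PySem.List.enumerate_eq_map_pyRange (diffsB L) 0]
  have hlen : PySem.List.len (diffsB L) = (L.length : Int) - 1 := by
    simp [PySem.List.len]
    omega
  rw [hlen]
  unfold aGaps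
  apply List.map_congr_left
  intro i hi
  rw [PySem.List.mem_pyRange_one] at hi
  have h1 : (0:Int) ≤ i + 1 := by omega
  have h2 : (i+1).toNat = i.toNat + 1 := by omega
  rw [PySem.List.pyGetD_of_nonneg _ _ hi.1, PySem.List.pyGetD_of_nonneg _ _ h1,
      PySem.List.pyGetD_of_nonneg _ _ hi.1, h2]
  rw [diffsB_getD L i.toNat (by omega)]

-- the common first-minimum fold both argmins reduce to
def amFold (l : List (Int × Int)) (mb : Int × Int) : Int × Int :=
  l.foldl (fun mb p => if p.2 < mb.2 then p else mb) mb

lemma min?_cons_amFold : ∀ (l : List (Int × Int)) (p : Int × Int),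
    PySem.List.min? (p :: l) (fun g => g.2) = some (amFold l p) := by
  intro l
  induction l with
  | nil => intro p; rfl
  | cons q t ih =>
      intro p
      have h1 : PySem.List.min? (p :: q :: t) (fun g : Int × Int => g.2)
          = PySem.List.min? ((if q.2 < p.2 then q else p) :: t) (fun g => g.2) := by
        simp only [PySem.List.min?, List.foldl_cons]
        split_ifs <;> rfl
      rw [h1, ih]
      rfl

lemma scan_enum (l : List Int) : ∀ (pre : List Int) (mb : Int × Int),
    (PySem.List.pyRange (pre.length : Int) ((pre.length : Int) + (l.length : Int))).foldl
        (fun mb j => if PySem.List.pyGetD (pre ++ l) j 0 < mb.2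
                     then (j, PySem.List.pyGetD (pre ++ l) j 0) else mb) mb
      = amFold (PySem.List.enumerate l (pre.length : Int)) mb := by
  induction l with
  | nil =>
      intro pre mb
      rw [show ((pre.length : Int) + ((List.nil (α := Int)).length : Int)) = (pre.length : Int) by simp]
      rw [PySem.List.pyRange_one_eq_nil (le_refl _)]
      rfl
  | cons x t ih =>
      intro pre mb
      have hcons := PySem.List.pyRange_one_cons
        (a := (pre.length : Int)) (b := (pre.length : Int) + ((x :: t).length : Int))
        (by simp only [List.length_cons]; push_cast; omega)
      rw [hcons]
      simp only [List.foldl_cons]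
      have hget : PySem.List.pyGetD (pre ++ x :: t) (pre.length : Int) 0 = x := by
        rw [PySem.List.pyGetD_of_nonneg _ _ (by positivity)]
        have hlt : pre.length < (pre ++ x :: t).length := by simp
        rw [Int.toNat_natCast, List.getD_eq_getElem _ _ hlt,
            List.getElem_append_right (le_refl _)]
        simp
      rw [hget]
      have henum : PySem.List.enumerate (x :: t) (pre.length : Int)
          = ((pre.length : Int), x) :: PySem.List.enumerate t ((pre.length : Int) + 1) := rfl
      rw [henum]
      have hAm : amFold ((((pre.length : Int), x)) :: PySem.List.enumerate t ((pre.length : Int) + 1)) mb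
          = amFold (PySem.List.enumerate t ((pre.length : Int) + 1))
              (if x < mb.2 then ((pre.length : Int), x) else mb) := rfl
      rw [hAm]
      have := ih (pre ++ [x]) (if x < mb.2 then ((pre.length : Int), x) else mb)
      simp only [List.length_append, List.length_cons, List.length_nil, List.append_assoc,
        List.cons_append, List.nil_append, Nat.cast_add, Nat.cast_one] at this ⊢
      convert this using 3 <;> push_cast <;> ring

lemma bArgmin_eq (g0 : Int) (rest : List Int) :
    bArgmin (g0 :: rest) = amFold (PySem.List.enumerate rest 1) (0, g0) := by
  have hse := scan_enum rest [g0] (0, g0)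
  simp only [List.length_cons, List.length_nil, List.cons_append, List.nil_append,
    Nat.cast_one, Nat.cast_zero] at hse
  unfold bArgmin
  have hinit : PySem.List.pyGetD (g0 :: rest) 0 0 = g0 := by
    rw [PySem.List.pyGetD_of_nonneg _ _ (le_refl 0)]; rfl
  rw [hinit]
  have hr : ((g0 :: rest).length : Int) = 1 + (rest.length : Int) := by
    simp; omega
  rw [hr]
  exact hse

lemma amFold_cases (l : List (Int × Int)) : ∀ (mb : Int × Int),
    amFold l mb = mb ∨ amFold l mb ∈ l := by
  induction l with
  | nil => intro mb; left; rfl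
  | cons p t ih =>
      intro mb
      have hstep : amFold (p :: t) mb = amFold t (if p.2 < mb.2 then p else mb) := rfl
      rw [hstep]
      rcases ih (if p.2 < mb.2 then p else mb) with h | h
      · rw [h]; by_cases hp : p.2 < mb.2
        · right; simp [hp]
        · left; simp [hp]
      · right; exact List.mem_cons_of_mem _ h

lemma amFold_fst_bound (rest : List Int) (g0 : Int) :
    0 ≤ (amFold (PySem.List.enumerate rest 1) (0, g0)).1 ∧
    (amFold (PySem.List.enumerate rest 1) (0, g0)).1 < (rest.length : Int) + 1 := by
  rcases amFold_cases (PySem.List.enumerate rest 1) (0, g0) with h | h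
  · rw [h]; constructor
    · exact le_refl 0
    · positivity
  · have hm : (amFold (PySem.List.enumerate rest 1) (0, g0)).1 ∈
        (PySem.List.enumerate rest 1).map (fun p => p.1) := List.mem_map_of_mem h
    rw [PySem.List.map_fst_enumerate] at hm
    rw [PySem.List.mem_pyRange_one] at hm
    omega

lemma diffsB_recon (gl : List Int) : ∀ (a : Int), diffsB (a :: bRecon a gl) = gl := by
  induction gl with
  | nil => intro a; rfl
  | cons g t ih =>
      intro a
      simp only [bRecon, diffsB_cons₂]
      rw [ih (a + g)]
      simp

lemma diffsB_eraseIdx (j : Nat) : ∀ (L : List Int), j + 2 < L.length →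
    diffsB (L.eraseIdx (j + 1)) =
      ((diffsB L).set j ((diffsB L).getD j 0 + (diffsB L).getD (j + 1) 0)).eraseIdx (j + 1) := by
  induction j with
  | zero =>
      intro L hL
      match L, hL with
      | a :: b :: c :: t, _ =>
        simp only [List.eraseIdx, diffsB_cons₂, List.getD_cons_zero, List.getD_cons_succ,
          List.set_cons_zero]
        have : c - a = b - a + (c - b) := by ring
        rw [this]
  | succ j ih =>
      intro L hL
      match L, hL with
      | a :: b :: t, hL =>
        have hlen : j + 2 < (b :: t).length := by
          simp only [List.length_cons] at hL ⊢; omega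
        have hmain := ih (b :: t) hlen
        have h1 : (a :: b :: t).eraseIdx (j + 1 + 1) = a :: ((b :: t).eraseIdx (j + 1)) := rfl
        rw [h1]
        have h2 : diffsB (a :: (b :: t).eraseIdx (j + 1)) =
            (b - a) :: diffsB ((b :: t).eraseIdx (j + 1)) := by
          have : (b :: t).eraseIdx (j + 1) = b :: t.eraseIdx j := rfl
          rw [this]
          exact diffsB_cons₂ a b (t.eraseIdx j)
        rw [h2, hmain]
        simp only [diffsB_cons₂, List.getD_cons_succ, List.set_cons_succ, List.eraseIdx]

lemma step_core (f : Int) (gl : List Int) (j : Nat) (hj : j + 1 < gl.length) :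
    (f :: bRecon f gl).eraseIdx (j + 1) =
      f :: bRecon f ((gl.set j (gl.getD j 0 + gl.getD (j + 1) 0)).eraseIdx (j + 1)) := by
  have h2 : diffsB ((f :: bRecon f gl).eraseIdx (j + 1)) =
      (gl.set j (gl.getD j 0 + gl.getD (j + 1) 0)).eraseIdx (j + 1) := by
    rw [diffsB_eraseIdx j _ (by simp; omega), diffsB_recon]
  have h1 : (f :: bRecon f gl).eraseIdx (j + 1) = f :: (bRecon f gl).eraseIdx j := rfl
  rw [h1] at h2 ⊢
  conv_lhs => rw [← recon_diffs ((bRecon f gl).eraseIdx j) f]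
  rw [h2]

lemma loopEq (N : Nat) : ∀ (gl : List Int) (f e : Int), gl.length ≤ N →
    aLoop (f :: bRecon f gl) e = f :: bRecon f (bLoop gl e) := by
  induction N with
  | zero =>
      intro gl f e hN
      have hgl : gl = [] := List.length_eq_zero_iff.mp (by omega)
      subst hgl
      rw [aLoop, bLoop, dif_neg (by simp [bRecon]), dif_neg (by simp)]
  | succ N ih =>
      intro gl f e hN
      by_cases hg : e < (gl.length : Int) + 1 ∧ 1 ≤ gl.length
      · obtain ⟨g0, rest, hgr⟩ : ∃ g0 rest, gl = g0 :: rest := by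
          cases gl with
          | nil => simp at hg
          | cons a b => exact ⟨a, b, rfl⟩
        set L := f :: bRecon f gl with hLdef
        have hLlen : L.length = gl.length + 1 := by simp [hLdef]
        have hdB : diffsB L = gl := diffsB_recon gl f
        have henum : PySem.List.enumerate gl 0 = ((0:Int), g0) :: PySem.List.enumerate rest 1 := by
          subst hgr; rfl
        set am := amFold (PySem.List.enumerate rest 1) ((0:Int), g0) with hamdef
        have hmin : PySem.List.min? (aGaps L) (fun g => g.2) = some am := by
          rw [aGaps_eq_enumerate L (by omega), hdB, henum, min?_cons_amFold]
        have hbm : bArgmin gl = am := by rw [hgr]; exact bArgmin_eq g0 rest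
        have hMb : 0 ≤ am.1 ∧ am.1 < (gl.length : Int) := by
          have hb := amFold_fst_bound rest g0
          rw [← hamdef] at hb
          have hlen : gl.length = rest.length + 1 := by rw [hgr]; simp
          constructor
          · exact hb.1
          · rw [hlen]; push_cast; exact_mod_cast hb.2
        have hA : e < (L.length : Int) ∧ 2 ≤ L.length := by
          rw [hLlen]; push_cast; omega
        rw [aLoop, bLoop, dif_pos hA, dif_pos hg]
        rw [hmin]
        simp only [Option.getD_some, hbm]
        by_cases hc1 : gl.length = 1
        · -- the single remaining gap: A removes position 1, B empties the gap list
          rw [dif_pos hc1]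
          have ham0 : am.1 = 0 := by omega
          rw [if_pos ham0]
          have hpop : PySem.List.pop? L 1 = some (L[1]'(by omega), L.eraseIdx 1) := by
            rw [show (1:Int) = ((1:Nat):Int) from rfl]
            exact PySem.List.pop?_natCast L 1 (by omega)
          rw [hpop]
          simp only [Option.getD_some]
          have hL1 : L.eraseIdx 1 = [f] := by
            rw [hLdef, hgr]
            have : rest = [] := by rw [hgr] at hc1; simpa using hc1
            subst this
            rfl
          rw [hL1]
          have := ih [] f e (by simp)
          simpa [bRecon] using this
        · rw [dif_neg hc1]
          have hglen2 : 2 ≤ gl.length := by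
            have : gl.length ≠ 0 := by omega
            omega
          by_cases hc2 : am.1 = (gl.length : Int) - 1
          · -- smallest gap is the last one: remove its left endpoint
            rw [dif_pos hc2]
            set j : Nat := am.1.toNat - 1 with hjdef
            have hj1 : am.1 = ((j + 1 : Nat) : Int) := by omega
            have hjlt : j + 1 < gl.length := by omega
            have hra : (if am.1 = 0 then (1:Int)
                else if am.1 = (L.length : Int) - 2 then am.1 else am.1 + 1) = ((j+1 : Nat) : Int) := by
              rw [if_neg (by omega), if_pos (by rw [hLlen]; push_cast; omega)]
              exact hj1
            rw [hra]
            have hjL : j + 1 < L.length := by omega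
            rw [PySem.List.pop?_natCast L (j+1) hjL]
            simp only [Option.getD_some]
            have hts1 : (am.1 - 1).toNat = j := by omega
            have hts2 : am.1.toNat = j + 1 := by omega
            have hget1 : PySem.List.pyGetD gl (am.1 - 1) 0 = gl.getD j 0 := by
              rw [PySem.List.pyGetD_of_nonneg _ _ (by omega), hts1]
            have hget2 : PySem.List.pyGetD gl am.1 0 = gl.getD (j+1) 0 := by
              rw [PySem.List.pyGetD_of_nonneg _ _ (by omega), hts2]
            rw [hget1, hget2, hts1, hts2]
            have hsc := step_core f gl j hjlt
            rw [← hLdef] at hsc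
            rw [hsc]
            exact ih _ f e (by simp [List.length_eraseIdx, List.length_set, hjlt]; omega)
          · -- interior (or leftmost) gap: remove its right endpoint
            rw [dif_neg hc2]
            set j : Nat := am.1.toNat with hjdef
            have hj1 : am.1 = ((j : Nat) : Int) := by omega
            have hjlt : j + 1 < gl.length := by omega
            have hra : (if am.1 = 0 then (1:Int)
                else if am.1 = (L.length : Int) - 2 then am.1 else am.1 + 1) = ((j+1 : Nat) : Int) := by
              by_cases h0 : am.1 = 0
              · rw [if_pos h0]; omega
              · rw [if_neg h0, if_neg (by rw [hLlen]; push_cast; omega)]; omega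
            rw [hra]
            have hjL : j + 1 < L.length := by omega
            rw [PySem.List.pop?_natCast L (j+1) hjL]
            simp only [Option.getD_some]
            have hts2 : (am.1 + 1).toNat = j + 1 := by omega
            have hget1 : PySem.List.pyGetD gl am.1 0 = gl.getD j 0 := by
              rw [PySem.List.pyGetD_of_nonneg _ _ (by omega), hjdef]
            have hget2 : PySem.List.pyGetD gl (am.1 + 1) 0 = gl.getD (j+1) 0 := by
              rw [PySem.List.pyGetD_of_nonneg _ _ (by omega), hts2]
            rw [hget1, hget2, hts2]
            have hsc := step_core f gl j hjlt
            rw [← hLdef] at hsc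
            rw [hsc]
            exact ih _ f e (by simp [List.length_eraseIdx, List.length_set, hjlt]; omega)
      · rw [aLoop, bLoop, dif_neg hg, dif_neg]
        simp only [List.length_cons, bRecon_length]
        push_cast
        omega

-- ===== VERDICT (by name: the statement is the Claim_ definition above) =====
theorem reduce_to_expected_py_spec : Claim_equal_reduce_to_expected_py := by
  intro positions expected _
  unfold Spec_reduce_to_expected_py reduce_to_expected_py reduce_to_expected_py_alt
  set pts := PySem.List.sorted positions (fun x => x) with hpts
  by_cases hg : pts.length < 2 ∨ (pts.length : Int) ≤ expected
  · rw [if_pos hg, aLoop, dif_neg (by push_cast; omega)]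
  · rw [if_neg hg]
    push_neg at hg
    obtain ⟨f, tail, hft⟩ : ∃ f tail, pts = f :: tail := by
      cases hp : pts with
      | nil => rw [hp] at hg; simp only [List.length_nil] at hg; omega
      | cons a b => exact ⟨a, b, rfl⟩
    have hfirst : PySem.List.pyGetD pts 0 0 = f := by
      rw [hft, PySem.List.pyGetD_of_nonneg _ _ (le_refl 0)]; rfl
    rw [hfirst]
    have hre : pts = f :: bRecon f (diffsB pts) := by
      conv_lhs => rw [hft]
      rw [hft, recon_diffs]
    conv_lhs => rw [hre]
    exact loopEq (diffsB pts).length (diffsB pts) f expected (le_refl _)
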